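-- pv_equiv track=rewrite | github.com/kewonit/aiml-prac | program03_dfs_game_map.py | dfs_explore_game_map
-- ===== SOURCE A (Python) =====
-- game_world_graph = {
--     "Entrance": ["Hall", "Kitchen"],
--     "Hall": ["Armory", "Garden"],
--     "Kitchen": ["Pantry"],
--     "Pantry": [],
--     "Armory": ["Boss"],
--     "Garden": ["Boss"],
--     "Boss": []
-- }
--
-- def dfs_explore_game_map(start_room, target_destination):
--     """
--     uses depth-first search to explore all rooms and find paths to the target.
--     keeps track of visited rooms and records the order we discovered them.
--     """
--     # stack holds tuples of (current_room, path_taken_so_far)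
--     exploration_stack = [(start_room, [start_room])]
--     traversal_order = []
--     visited_rooms = set()
--     paths_to_target = []
--
--     while exploration_stack:
--         # pop the last room we were exploring
--         current_room, current_path = exploration_stack.pop()
--
--         # skip if we already visited this room
--         if current_room in visited_rooms:
--             continue
--
--         visited_rooms.add(current_room)
--         traversal_order.append((current_room, list(current_path)))
--
--         # if we found the target, save this path
--         if current_room == target_destination:
--             paths_to_target.append(current_path)
--
--         # explore neighbors (reversed to maintain left-to-right order with stack)
--         for adjacent_room in reversed(game_world_graph.get(current_room, [])):
--             exploration_stack.append((adjacent_room, current_path + [adjacent_room]))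
--
--     return traversal_order, paths_to_target
-- ===== SOURCE B (Python) =====
-- game_world_graph = {
--     "Entrance": ["Hall", "Kitchen"],
--     "Hall": ["Armory", "Garden"],
--     "Kitchen": ["Pantry"],
--     "Pantry": [],
--     "Armory": ["Boss"],
--     "Garden": ["Boss"],
--     "Boss": []
-- }
--
-- def dfs_explore_game_map(start_room, target_destination):
--     """
--     recursive depth-first exploration: visited is checked at entry, neighbors
--     are descended left to right, so visit order and first-reach paths match
--     the iterative pre-order traversal.
--     """
--     traversal_order = []
--     paths_to_target = []
--     visited_rooms = set()
--
--     def dfs(room, path):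
--         if room in visited_rooms:
--             return
--         visited_rooms.add(room)
--         traversal_order.append((room, list(path)))
--         if room == target_destination:
--             paths_to_target.append(path)
--         for adjacent_room in game_world_graph.get(room, []):
--             dfs(adjacent_room, path + [adjacent_room])
--
--     dfs(start_room, [start_room])
--     return traversal_order, paths_to_target
-- ===== Notes on version B (the rewrite author's own statement) =====
-- stated objective: idiomatic
-- what changed: Replaced A's explicit stack with reversed-neighbor pushes by a recursive dfs helper that checks visited at entry and descends neighbors left to right, giving the same pre-order traversal and first-reach paths.
import Mathlib
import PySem

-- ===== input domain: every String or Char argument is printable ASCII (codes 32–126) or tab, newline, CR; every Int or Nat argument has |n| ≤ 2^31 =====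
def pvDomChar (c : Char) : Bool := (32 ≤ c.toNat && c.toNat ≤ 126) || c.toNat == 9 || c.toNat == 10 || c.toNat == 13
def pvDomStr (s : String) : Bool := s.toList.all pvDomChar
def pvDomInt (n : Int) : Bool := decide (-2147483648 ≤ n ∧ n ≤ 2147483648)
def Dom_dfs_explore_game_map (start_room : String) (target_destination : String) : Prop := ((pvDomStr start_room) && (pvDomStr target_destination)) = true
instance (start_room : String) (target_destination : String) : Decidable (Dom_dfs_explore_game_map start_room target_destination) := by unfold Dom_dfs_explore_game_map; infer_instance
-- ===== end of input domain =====

-- B replaces A's explicit stack with reversed pushes by a recursive left-to-right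
-- DFS helper (visited checked at entry); objective: more idiomatic, same result.

-- game_world_graph.get(room, []) on the fixed module-level dict
def pvGraphGet (r : String) : List String :=
  if r == "Entrance" then ["Hall", "Kitchen"]
  else if r == "Hall" then ["Armory", "Garden"]
  else if r == "Kitchen" then ["Pantry"]
  else if r == "Pantry" then []
  else if r == "Armory" then ["Boss"]
  else if r == "Garden" then ["Boss"]
  else if r == "Boss" then []
  else []

-- ===== PORT A =====
-- A's while loop over the explicit stack (top of stack = head of list; the
-- 'for adjacent_room in reversed(...)' push loop is the foldl consing entries
-- on). Fuel renders the while loop as structural recursion; on the fixed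
-- 7-room graph the loop runs at most 17 iterations for any input, so fuel 100
-- is never exhausted.
def pvLoopA (target : String) : Nat → List (String × List String) →
    List (String × List String) → PySem.Set String → List (List String) →
    (List (String × List String)) × List (List String)
  | 0, _, trav, _, paths => (trav, paths)
  | _ + 1, [], trav, _, paths => (trav, paths)
  | f + 1, (room, path) :: rest, trav, visited, paths =>
    if PySem.Set.contains visited room then
      pvLoopA target f rest trav visited paths
    else
      pvLoopA target f
        ((pvGraphGet room).reverse.foldl (fun s nb => (nb, path ++ [nb]) :: s) rest)
        (trav ++ [(room, path)])
        (PySem.Set.add visited room)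
        (if room == target then paths ++ [path] else paths)
def dfs_explore_game_map (start_room : String) (target_destination : String) :
    (List (String × List String)) × List (List String) :=
  pvLoopA target_destination 100 [(start_room, [start_room])] [] PySem.Set.empty []

-- ===== PORT B =====
-- B's recursive dfs helper; state = (visited, traversal_order, paths_to_target).
-- Fuel bounds the recursion depth (at most 8 on the fixed graph), never exhausted.
def pvDfsB (target : String) : Nat → String → List String →
    PySem.Set String × List (String × List String) × List (List String) →
    PySem.Set String × List (String × List String) × List (List String)
  | 0, _, _, st => st
  | f + 1, room, path, st =>
    if PySem.Set.contains st.1 room then st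
    else
      (pvGraphGet room).foldl
        (fun s nb => pvDfsB target f nb (path ++ [nb]) s)
        (PySem.Set.add st.1 room, st.2.1 ++ [(room, path)],
          if room == target then st.2.2 ++ [path] else st.2.2)
def dfs_explore_game_map_alt (start_room : String) (target_destination : String) :
    (List (String × List String)) × List (List String) :=
  ((pvDfsB target_destination 100 start_room [start_room] (PySem.Set.empty, [], [])).2.1,
   (pvDfsB target_destination 100 start_room [start_room] (PySem.Set.empty, [], [])).2.2)

-- ===== PRECONDITION & SPEC =====
def Spec_dfs_explore_game_map (start_room : String) (target_destination : String) (out : (List (String × List String)) × List (List String)) : Prop := out = dfs_explore_game_map_alt start_room target_destination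
instance (start_room : String) (target_destination : String) (out : (List (String × List String)) × List (List String)) : Decidable (Spec_dfs_explore_game_map start_room target_destination out) := by unfold Spec_dfs_explore_game_map; infer_instance

-- ===== CLAIM (what is proved, stated in full; the proofs are below) =====
def Claim_equal_dfs_explore_game_map : Prop := ∀ (start_room : String) (target_destination : String), Dom_dfs_explore_game_map start_room target_destination → Spec_dfs_explore_game_map start_room target_destination (dfs_explore_game_map start_room target_destination)

-- ===== LEMMAS AND PROOFS =====
-- fuel-exposing step equations for the two recursions (the ports' own equation
-- lemmas match 'f + 1' and do not fire on numerals)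
lemma pvLoopA_nil (t : String) (f : Nat) (tr : List (String × List String))
    (v : PySem.Set String) (p : List (List String)) : pvLoopA t f [] tr v p = (tr, p) := by
  cases f <;> rfl
lemma pvLoopA_cons (t : String) (f : Nat) (hf : f ≠ 0) (room : String) (path : List String)
    (rest tr : List (String × List String)) (v : PySem.Set String) (p : List (List String)) :
    pvLoopA t f ((room, path) :: rest) tr v p =
      if PySem.Set.contains v room then pvLoopA t (f - 1) rest tr v p
      else pvLoopA t (f - 1)
        ((pvGraphGet room).reverse.foldl (fun s nb => (nb, path ++ [nb]) :: s) rest)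
        (tr ++ [(room, path)]) (PySem.Set.add v room)
        (if room == t then p ++ [path] else p) := by
  cases f with
  | zero => exact absurd rfl hf
  | succ n => rfl
lemma pvDfsB_step (t : String) (f : Nat) (hf : f ≠ 0) (room : String) (path : List String)
    (st : PySem.Set String × List (String × List String) × List (List String)) :
    pvDfsB t f room path st =
      if PySem.Set.contains st.1 room then st
      else (pvGraphGet room).foldl
        (fun s nb => pvDfsB t (f - 1) nb (path ++ [nb]) s)
        (PySem.Set.add st.1 room, st.2.1 ++ [(room, path)],
          if room == t then st.2.2 ++ [path] else st.2.2) := by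
  cases f with
  | zero => exact absurd rfl hf
  | succ n => rfl

set_option maxRecDepth 10000 in
lemma pv_main (s t : String) : dfs_explore_game_map s t = dfs_explore_game_map_alt s t := by
  by_cases h1 : s = "Entrance"
  · subst h1
    unfold dfs_explore_game_map dfs_explore_game_map_alt
    repeat first
      | rfl
      | rw [pvLoopA_nil]
      | rw [pvLoopA_cons _ _ (by norm_num)]
      | rw [pvDfsB_step _ _ (by norm_num)]
      | simp only [PySem.Set.contains, PySem.Set.empty, PySem.Set.add, List.contains_eq_mem,
          List.not_mem_nil, List.mem_cons, List.mem_singleton, String.reduceEq, decide_false,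
          decide_true, Bool.false_eq_true, decide_eq_true_eq, if_false, if_true, reduceIte,
          pvGraphGet, String.reduceBEq, List.reverse_nil,
          List.reverse_cons, List.foldl_nil, List.foldl_cons, Nat.reduceSub, List.append_nil,
          List.nil_append, List.cons_append, or_false, false_or, or_true, true_or, or_self,
          not_false_eq_true, ne_eq]
  by_cases h2 : s = "Hall"
  · subst h2
    unfold dfs_explore_game_map dfs_explore_game_map_alt
    repeat first
      | rfl
      | rw [pvLoopA_nil]
      | rw [pvLoopA_cons _ _ (by norm_num)]
      | rw [pvDfsB_step _ _ (by norm_num)]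
      | simp only [PySem.Set.contains, PySem.Set.empty, PySem.Set.add, List.contains_eq_mem,
          List.not_mem_nil, List.mem_cons, List.mem_singleton, String.reduceEq, decide_false,
          decide_true, Bool.false_eq_true, decide_eq_true_eq, if_false, if_true, reduceIte,
          pvGraphGet, String.reduceBEq, List.reverse_nil,
          List.reverse_cons, List.foldl_nil, List.foldl_cons, Nat.reduceSub, List.append_nil,
          List.nil_append, List.cons_append, or_false, false_or, or_true, true_or, or_self,
          not_false_eq_true, ne_eq]
  by_cases h3 : s = "Kitchen"
  · subst h3
    unfold dfs_explore_game_map dfs_explore_game_map_alt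
    repeat first
      | rfl
      | rw [pvLoopA_nil]
      | rw [pvLoopA_cons _ _ (by norm_num)]
      | rw [pvDfsB_step _ _ (by norm_num)]
      | simp only [PySem.Set.contains, PySem.Set.empty, PySem.Set.add, List.contains_eq_mem,
          List.not_mem_nil, List.mem_cons, List.mem_singleton, String.reduceEq, decide_false,
          decide_true, Bool.false_eq_true, decide_eq_true_eq, if_false, if_true, reduceIte,
          pvGraphGet, String.reduceBEq, List.reverse_nil,
          List.reverse_cons, List.foldl_nil, List.foldl_cons, Nat.reduceSub, List.append_nil,
          List.nil_append, List.cons_append, or_false, false_or, or_true, true_or, or_self,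
          not_false_eq_true, ne_eq]
  by_cases h4 : s = "Pantry"
  · subst h4
    unfold dfs_explore_game_map dfs_explore_game_map_alt
    repeat first
      | rfl
      | rw [pvLoopA_nil]
      | rw [pvLoopA_cons _ _ (by norm_num)]
      | rw [pvDfsB_step _ _ (by norm_num)]
      | simp only [PySem.Set.contains, PySem.Set.empty, PySem.Set.add, List.contains_eq_mem,
          List.not_mem_nil, List.mem_cons, List.mem_singleton, String.reduceEq, decide_false,
          decide_true, Bool.false_eq_true, decide_eq_true_eq, if_false, if_true, reduceIte,
          pvGraphGet, String.reduceBEq, List.reverse_nil,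
          List.reverse_cons, List.foldl_nil, List.foldl_cons, Nat.reduceSub, List.append_nil,
          List.nil_append, List.cons_append, or_false, false_or, or_true, true_or, or_self,
          not_false_eq_true, ne_eq]
  by_cases h5 : s = "Armory"
  · subst h5
    unfold dfs_explore_game_map dfs_explore_game_map_alt
    repeat first
      | rfl
      | rw [pvLoopA_nil]
      | rw [pvLoopA_cons _ _ (by norm_num)]
      | rw [pvDfsB_step _ _ (by norm_num)]
      | simp only [PySem.Set.contains, PySem.Set.empty, PySem.Set.add, List.contains_eq_mem,
          List.not_mem_nil, List.mem_cons, List.mem_singleton, String.reduceEq, decide_false,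
          decide_true, Bool.false_eq_true, decide_eq_true_eq, if_false, if_true, reduceIte,
          pvGraphGet, String.reduceBEq, List.reverse_nil,
          List.reverse_cons, List.foldl_nil, List.foldl_cons, Nat.reduceSub, List.append_nil,
          List.nil_append, List.cons_append, or_false, false_or, or_true, true_or, or_self,
          not_false_eq_true, ne_eq]
  by_cases h6 : s = "Garden"
  · subst h6
    unfold dfs_explore_game_map dfs_explore_game_map_alt
    repeat first
      | rfl
      | rw [pvLoopA_nil]
      | rw [pvLoopA_cons _ _ (by norm_num)]
      | rw [pvDfsB_step _ _ (by norm_num)]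
      | simp only [PySem.Set.contains, PySem.Set.empty, PySem.Set.add, List.contains_eq_mem,
          List.not_mem_nil, List.mem_cons, List.mem_singleton, String.reduceEq, decide_false,
          decide_true, Bool.false_eq_true, decide_eq_true_eq, if_false, if_true, reduceIte,
          pvGraphGet, String.reduceBEq, List.reverse_nil,
          List.reverse_cons, List.foldl_nil, List.foldl_cons, Nat.reduceSub, List.append_nil,
          List.nil_append, List.cons_append, or_false, false_or, or_true, true_or, or_self,
          not_false_eq_true, ne_eq]
  by_cases h7 : s = "Boss"
  · subst h7
    unfold dfs_explore_game_map dfs_explore_game_map_alt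
    repeat first
      | rfl
      | rw [pvLoopA_nil]
      | rw [pvLoopA_cons _ _ (by norm_num)]
      | rw [pvDfsB_step _ _ (by norm_num)]
      | simp only [PySem.Set.contains, PySem.Set.empty, PySem.Set.add, List.contains_eq_mem,
          List.not_mem_nil, List.mem_cons, List.mem_singleton, String.reduceEq, decide_false,
          decide_true, Bool.false_eq_true, decide_eq_true_eq, if_false, if_true, reduceIte,
          pvGraphGet, String.reduceBEq, List.reverse_nil,
          List.reverse_cons, List.foldl_nil, List.foldl_cons, Nat.reduceSub, List.append_nil,
          List.nil_append, List.cons_append, or_false, false_or, or_true, true_or, or_self,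
          not_false_eq_true, ne_eq]
  have c1 : (s == "Entrance") = false := beq_eq_false_iff_ne.mpr h1
  have c2 : (s == "Hall") = false := beq_eq_false_iff_ne.mpr h2
  have c3 : (s == "Kitchen") = false := beq_eq_false_iff_ne.mpr h3
  have c4 : (s == "Pantry") = false := beq_eq_false_iff_ne.mpr h4
  have c5 : (s == "Armory") = false := beq_eq_false_iff_ne.mpr h5
  have c6 : (s == "Garden") = false := beq_eq_false_iff_ne.mpr h6
  have c7 : (s == "Boss") = false := beq_eq_false_iff_ne.mpr h7
  unfold dfs_explore_game_map dfs_explore_game_map_alt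
  rw [pvLoopA_cons _ _ (by norm_num), pvDfsB_step _ _ (by norm_num)]
  simp only [PySem.Set.contains, PySem.Set.empty, List.contains_eq_mem, List.not_mem_nil,
    decide_false, Bool.false_eq_true, if_false, pvGraphGet, c1, c2, c3, c4, c5, c6, c7,
    List.reverse_nil, List.foldl_nil, Nat.reduceSub]
  rw [pvLoopA_nil]

-- ===== VERDICT (by name: the statement is the Claim_ definition above) =====
theorem dfs_explore_game_map_spec : Claim_equal_dfs_explore_game_map := by
  intro s t _
  unfold Spec_dfs_explore_game_map
  exact pv_main s t
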